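-- pv_equiv track=rewrite | github.com/tttaenggg/Agent | InteractLightingAgent/interactlightingagent/extension/api.py | convertPostMsg
-- ===== SOURCE A (Python) =====
-- def convertPostMsg(postmsg):
--     msgToDevice = {}
--
--     for k, v in postmsg.items():
--         if str(k) == 'status':
--             msgToDevice['state'] = postmsg['status'].upper()  # off, on, automatic, dim
--         elif str(k) == 'level':
--             msgToDevice['level'] = postmsg['level']
--         else:
--             msgToDevice[k] = v
--
--     return msgToDevice
-- ===== SOURCE B (Python) =====
-- def convertPostMsg(postmsg):
--     items = list(postmsg.items())
--     keys = [k for k, _ in items]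
--     if 'status' in keys:
--         i = keys.index('status')
--         items[i] = ('state', items[i][1].upper())
--     return dict(items)
-- ===== Notes on version B (the rewrite author's own statement) =====
-- stated objective: simpler
-- what changed: A loops over every item with a three-way branch on the key and re-looks each special key up in the dict; B copies the items once, patches the single 'status' entry in place at its index (the 'level' case disappears since it is an identity), and rebuilds the dict. Pre_ excludes association lists whose keys repeat, which represent no Python dict argument.
import Mathlib
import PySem

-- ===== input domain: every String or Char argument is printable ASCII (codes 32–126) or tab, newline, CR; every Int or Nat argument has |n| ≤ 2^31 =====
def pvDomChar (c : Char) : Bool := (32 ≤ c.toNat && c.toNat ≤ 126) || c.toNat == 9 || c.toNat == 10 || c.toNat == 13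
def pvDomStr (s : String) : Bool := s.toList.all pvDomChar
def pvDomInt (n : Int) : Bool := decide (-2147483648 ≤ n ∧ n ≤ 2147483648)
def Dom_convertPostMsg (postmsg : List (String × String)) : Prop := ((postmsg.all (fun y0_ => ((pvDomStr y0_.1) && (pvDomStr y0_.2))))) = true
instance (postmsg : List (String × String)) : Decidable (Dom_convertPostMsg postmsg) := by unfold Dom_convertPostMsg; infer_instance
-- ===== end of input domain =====

-- B replaces A's per-item three-way branching loop by copy, patch the single 'status' entry in
-- place, rebuild the dict; objective: simpler (no per-key branching, 'level' needs no case).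

-- ===== PORT A =====
-- literal port of A: loop over the items, branching on the key; the dict lookups
-- postmsg['status'] / postmsg['level'] are ported as getD with default "" — exact, because the
-- looked-up key is the key of the current item, hence present (Python never reaches KeyError here).
def convertPostMsg (postmsg : List (String × String)) : List (String × String) :=
  (postmsg.foldl (fun msgToDevice kv =>
      if kv.1 == "status" then
        msgToDevice.insert "state" (PySem.Str.upper ((PySem.Dict.mk postmsg).getD "status" ""))
      else if kv.1 == "level" then
        msgToDevice.insert "level" ((PySem.Dict.mk postmsg).getD "level" "")
      else
        msgToDevice.insert kv.1 kv.2) PySem.Dict.empty).items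

-- ===== PORT B =====
-- B-side helper: items = list(postmsg.items()); if 'status' in keys: patch items[keys.index('status')]
def pvPatch (items : List (String × String)) : List (String × String) :=
  match PySem.List.index? (items.map Prod.fst) "status" with
  | none => items
  | some i => items.set i ("state", PySem.Str.upper ((items.getD i ("", "")).2))

def convertPostMsg_alt (postmsg : List (String × String)) : List (String × String) :=
  (PySem.Dict.ofList (pvPatch postmsg)).items

-- ===== PRECONDITION & SPEC =====
-- postmsg models a Python dict[str, str]: a dict's items never repeat a key, so association
-- lists with duplicate keys represent no input A can receive; they are excluded.
def Pre_convertPostMsg (postmsg : List (String × String)) : Prop :=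
  (postmsg.map Prod.fst).Nodup
instance (postmsg : List (String × String)) : Decidable (Pre_convertPostMsg postmsg) := by
  unfold Pre_convertPostMsg; infer_instance

def pvWitness_convertPostMsg : (List (String × String)) :=
  [("status", "on"), ("level", "5"), ("mode", "eco")]

def Spec_convertPostMsg (postmsg : List (String × String)) (out : List (String × String)) : Prop := out = convertPostMsg_alt postmsg
instance (postmsg : List (String × String)) (out : List (String × String)) : Decidable (Spec_convertPostMsg postmsg out) := by unfold Spec_convertPostMsg; infer_instance

-- ===== CLAIM (what is proved, stated in full; the proofs are below) =====
def Claim_equal_convertPostMsg : Prop := ∀ (postmsg : List (String × String)), Dom_convertPostMsg postmsg → Pre_convertPostMsg postmsg → Spec_convertPostMsg postmsg (convertPostMsg postmsg)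

-- ===== LEMMAS AND PROOFS =====

-- the per-item remapping both programs realise
def pvF (kv : String × String) : String × String :=
  if kv.1 = "status" then ("state", PySem.Str.upper kv.2) else kv

theorem pvF_of_ne {kv : String × String} (h : kv.1 ≠ "status") : pvF kv = kv := by
  simp [pvF, h]

theorem pvMapF_eq_self (l : List (String × String))
    (h : "status" ∉ l.map Prod.fst) : l.map pvF = l := by
  induction l with
  | nil => rfl
  | cons kv t ih =>
      simp only [List.map_cons, List.mem_cons, not_or] at h
      rw [List.map_cons, pvF_of_ne (fun hk => h.1 hk.symm), ih h.2]

theorem pvPatch_eq_map (l : List (String × String))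
    (h : (l.map Prod.fst).Nodup) : pvPatch l = l.map pvF := by
  induction l with
  | nil => rfl
  | cons kv t ih =>
      simp only [List.map_cons, List.nodup_cons] at h
      by_cases hk : kv.1 = "status"
      · unfold pvPatch
        rw [List.map_cons, hk, PySem.List.index?_cons_self]
        simp only [List.set_cons_zero, List.getD_cons_zero]
        rw [List.map_cons, pvMapF_eq_self t (hk ▸ h.1)]
        simp [pvF, hk]
      · unfold pvPatch
        rw [List.map_cons, PySem.List.index?_cons_of_ne _ hk]
        cases h2 : PySem.List.index? (t.map Prod.fst) "status" with
        | none =>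
            simp only [Option.map_none]
            rw [List.map_cons, pvF_of_ne hk,
              pvMapF_eq_self t ((PySem.List.index?_eq_none_iff _ _).mp h2)]
        | some j =>
            simp only [Option.map_some, List.set_cons_succ, List.getD_cons_succ]
            rw [List.map_cons, pvF_of_ne hk]
            have := ih h.2
            unfold pvPatch at this
            rw [h2] at this
            exact congrArg (List.cons kv) this

theorem pvLookup_eq (postmsg : List (String × String)) (kv : String × String)
    (hmem : kv ∈ postmsg) (h : Pre_convertPostMsg postmsg) :
    (PySem.Dict.mk postmsg).getD kv.1 "" = kv.2 := by
  refine PySem.Dict.getD_of_mem_items (PySem.Dict.mk postmsg) ?_ ?_ ""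
  · exact hmem
  · simpa [PySem.Dict.keys] using h

theorem pvA_eq_foldl_map (postmsg : List (String × String))
    (h : Pre_convertPostMsg postmsg) :
    convertPostMsg postmsg =
      ((postmsg.map pvF).foldl (fun d kv => d.insert kv.1 kv.2) PySem.Dict.empty).items := by
  unfold convertPostMsg
  rw [List.foldl_map]
  congr 1
  refine PySem.List.foldl_congr_mem postmsg _ _ _ ?_
  intro acc kv hmem
  by_cases hk : kv.1 = "status"
  · have hv : (PySem.Dict.mk postmsg).getD "status" "" = kv.2 := hk ▸ pvLookup_eq postmsg kv hmem h
    simp [hk, pvF, hv]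
  · by_cases hl : kv.1 = "level"
    · have hv : (PySem.Dict.mk postmsg).getD "level" "" = kv.2 := hl ▸ pvLookup_eq postmsg kv hmem h
      simp [hl, pvF, hv]
    · simp [hk, hl, pvF]

-- ===== VERDICT (by name: the statement is the Claim_ definition above) =====
theorem convertPostMsg_spec : Claim_equal_convertPostMsg := by
  intro postmsg _ hpre
  unfold Spec_convertPostMsg convertPostMsg_alt
  rw [pvPatch_eq_map postmsg hpre, pvA_eq_foldl_map postmsg hpre]
  rfl
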